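-- pv_equiv track=rewrite | github.com/kingdongus/AoC-2023 | day13/solution.py | find_vertical_axis_v2
-- ===== SOURCE A (Python) =====
-- def find_candidates(line):
--     candidates = []
--     for i in range(1, len(line)):
--         left, right = line[0:i], line[i:len(line)]
--         to_compare_length = min(len(left), len(right))
--         left, right = left[-to_compare_length:], right[:to_compare_length]
--         if left == right[::-1]:
--             candidates += [i]
--     return candidates
--
-- def find_vertical_axis_v2(chunk):
--     # find the one that is almost good enough
--     candidates_all_lines = {x: 0 for x in range(0, len(chunk[0]) + 1)}
--     for line in chunk:
--         candidates_per_line = find_candidates(line)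
--         for candidate in candidates_per_line:
--             candidates_all_lines[candidate] += 1
--     spicy_new_candidates = [x for x, y in candidates_all_lines.items() if y == len(chunk) - 1]
--     assert len(spicy_new_candidates) < 2
--     return 0 if not spicy_new_candidates else spicy_new_candidates[0]
-- ===== SOURCE B (Python) =====
-- def _is_mirror(line, i):
--     # True iff splitting line before index i gives a (partial) mirror image
--     if i < 1 or i >= len(line):
--         return False
--     l, r = i - 1, i
--     while l >= 0 and r < len(line):
--         if line[l] != line[r]:
--             return False
--         l -= 1
--         r += 1
--     return True
--
-- def find_vertical_axis_v2(chunk):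
--     n = len(chunk)
--     width = len(chunk[0])
--     for axis in range(0, width + 1):
--         if sum(1 for line in chunk if _is_mirror(line, axis)) == n - 1:
--             return axis
--     return 0
-- ===== Notes on version B (the rewrite author's own statement) =====
-- stated objective: alternative
-- what changed: A builds per-line candidate lists by slicing and reversing at every split and tallies them in a dict keyed 0..len(chunk[0]); B scans the axis positions directly and tests each line with an in-place two-pointer mirror check, counting matching lines and returning the first axis with all-but-one matches.
-- outside the precondition, e.g. on find_vertical_axis_v2([]): A raises IndexError, B raises IndexError; on find_vertical_axis_v2(['aa']): A raises AssertionError, B returns 0; on find_vertical_axis_v2(['a', 'bbbb']): A raises KeyError, B returns 1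
import Mathlib
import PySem

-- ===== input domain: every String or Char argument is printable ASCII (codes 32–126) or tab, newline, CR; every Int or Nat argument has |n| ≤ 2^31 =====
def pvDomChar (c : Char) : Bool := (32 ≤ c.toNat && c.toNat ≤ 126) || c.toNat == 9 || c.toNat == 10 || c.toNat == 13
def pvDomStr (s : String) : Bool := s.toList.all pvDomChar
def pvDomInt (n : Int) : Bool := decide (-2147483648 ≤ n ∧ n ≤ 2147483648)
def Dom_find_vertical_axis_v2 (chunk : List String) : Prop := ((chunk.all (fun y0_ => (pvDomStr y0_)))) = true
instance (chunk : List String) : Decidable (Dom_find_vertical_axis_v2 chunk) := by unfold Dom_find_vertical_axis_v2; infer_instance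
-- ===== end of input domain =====

-- B replaces A's per-line candidate lists tallied in a dict by a direct scan over axis
-- positions with a two-pointer mirror test per line (objective: alternative, same cost).


-- ===== PORT A =====
-- helper find_candidates(line), on the string's code points
def find_candidates (line : List Char) : List Int :=
  (PySem.List.pyRange 1 (line.length : Int) 1).foldl (fun candidates i =>
    let left := PySem.List.slice line (some 0) (some i)
    let right := PySem.List.slice line (some i) (some (line.length : Int))
    let to_compare_length : Int := min (left.length : Int) (right.length : Int)
    let left' := PySem.List.slice left (some (-to_compare_length)) none
    let right' := PySem.List.slice right none (some to_compare_length)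
    if left' == ((PySem.List.slice? right' none none (-1)).getD []) then
      candidates ++ [i]
    else candidates) []

def find_vertical_axis_v2 (chunk : List String) : Int :=
  -- chunk[0]: IndexError on empty chunk is excluded by Pre_
  let first := ((PySem.List.pyGet? chunk 0).getD "").toList
  let candidates_all_lines : PySem.Dict Int Int :=
    (PySem.List.pyRange 0 ((first.length : Int) + 1) 1).foldl
      (fun d x => d.insert x 0) PySem.Dict.empty
  -- candidates_all_lines[candidate] += 1: KeyError (candidate beyond the keys) is
  -- excluded by Pre_, where the key is always present, so modify is exact there
  let tallied := chunk.foldl (fun d line =>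
    (find_candidates line.toList).foldl (fun d c => d.modify c 0 (· + 1)) d)
    candidates_all_lines
  let spicy_new_candidates :=
    (tallied.items.filter (fun p => p.2 == (chunk.length : Int) - 1)).map (·.1)
  -- assert len(spicy_new_candidates) < 2: AssertionError excluded by Pre_
  match spicy_new_candidates with
  | [] => 0
  | x :: _ => x

-- ===== PORT B =====
-- two-pointer scan outward from the split, port of _is_mirror's while loop
-- (recursion on l+1, so the Python l = -1 exit is the 0 case)
def mirrorLoop (s : List Char) : Nat → Nat → Bool
  | 0, _ => true
  | l + 1, r =>
    if r < s.length then
      if s[l]? == s[r]? then mirrorLoop s l (r + 1) else false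
    else true

def is_mirror (s : List Char) (i : Int) : Bool :=
  if i < 1 || (s.length : Int) ≤ i then false
  else mirrorLoop s i.toNat i.toNat

def find_vertical_axis_v2_alt (chunk : List String) : Int :=
  let n := chunk.length
  -- len(chunk[0]): IndexError on empty chunk is excluded by Pre_
  let width := ((PySem.List.pyGet? chunk 0).getD "").toList.length
  match (PySem.List.pyRange 0 ((width : Int) + 1) 1).find? (fun axis =>
      ((chunk.countP (fun line => is_mirror line.toList axis)) : Int) == (n : Int) - 1) with
  | some a => a
  | none => 0

-- ===== PRECONDITION & SPEC =====
-- reflB s i: splitting s before position i gives a mirror image (the reflection test)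
def reflB (s : List Char) (i : Nat) : Bool :=
  decide (1 ≤ i) && decide (i < s.length) &&
  ((s.take i).drop (i - min i (s.length - i)) ==
    ((s.drop i).take (min i (s.length - i))).reverse)

-- Pre_ excludes exactly the inputs where A raises: the empty chunk (IndexError at
-- chunk[0]), chunks where some line has a reflection position beyond len(chunk[0])
-- (KeyError in the tally dict), and chunks where two or more positions are
-- reflections of all-but-one lines (the assert fails).
def Pre_find_vertical_axis_v2 (chunk : List String) : Prop :=
  chunk ≠ [] ∧
  (∀ line ∈ chunk, ∀ i < line.toList.length,
      reflB line.toList i = true → i ≤ (chunk.headD "").toList.length) ∧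
  ((List.range ((chunk.headD "").toList.length + 1)).countP
      (fun x => chunk.countP (fun line => reflB line.toList x) == chunk.length - 1) ≤ 1)

instance (chunk : List String) : Decidable (Pre_find_vertical_axis_v2 chunk) := by
  unfold Pre_find_vertical_axis_v2; infer_instance

def pvWitness_find_vertical_axis_v2 : List String := ["#.##.", "#....", "#.##."]

def Spec_find_vertical_axis_v2 (chunk : List String) (out : Int) : Prop := out = find_vertical_axis_v2_alt chunk
instance (chunk : List String) (out : Int) : Decidable (Spec_find_vertical_axis_v2 chunk out) := by unfold Spec_find_vertical_axis_v2; infer_instance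

-- ===== CLAIM (what is proved, stated in full; the proofs are below) =====
def Claim_equal_find_vertical_axis_v2 : Prop := ∀ (chunk : List String), Dom_find_vertical_axis_v2 chunk → Pre_find_vertical_axis_v2 chunk → Spec_find_vertical_axis_v2 chunk (find_vertical_axis_v2 chunk)


-- ===== LEMMAS AND PROOFS =====

-- reflB extracts its bounds
theorem reflB_bounds {s : List Char} {k : Nat} (h : reflB s k = true) :
    1 ≤ k ∧ k < s.length := by
  unfold reflB at h
  simp only [Bool.and_eq_true, decide_eq_true_eq] at h
  exact ⟨h.1.1, h.1.2⟩

-- the candidate test of port A is reflB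
theorem find_candidates_eq (s : List Char) :
    find_candidates s
      = (PySem.List.pyRange 1 (s.length : Int) 1).filter (fun i => reflB s i.toNat) := by
  unfold find_candidates
  simp only []
  rw [PySem.List.foldl_append_if_eq_filter]
  rw [List.nil_append]
  apply List.filter_congr
  intro i hi
  rw [PySem.List.mem_pyRange_one] at hi
  obtain ⟨h1, h2⟩ := hi
  have hk : i = (i.toNat : Int) := (Int.toNat_of_nonneg (by omega)).symm
  set k := i.toNat with hkdef
  have hk1 : 1 ≤ k := by omega
  have hk2 : k < s.length := by omega
  rw [hk]
  rw [PySem.List.slice_zero_start, PySem.List.slice_to_natCast]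
  rw [PySem.List.slice_natCast]
  have hdrop : (s.drop k).take (s.length - k) = s.drop k := by
    rw [← List.length_drop (l := s) (i := k), List.take_length]
  rw [hdrop]
  have hlen1 : ((s.take k).length : Int) = (k : Int) := by
    simp [List.length_take]; omega
  have hlen2 : ((s.drop k).length : Int) = ((s.length - k : Nat) : Int) := by
    simp [List.length_drop]
  rw [hlen1, hlen2]
  have hmin : min (k : Int) ((s.length - k : Nat) : Int) = ((min k (s.length - k) : Nat) : Int) := by
    push_cast; omega
  rw [hmin]
  set m := min k (s.length - k) with hmdef
  have hmpos : 0 < m := by omega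
  rw [PySem.List.slice_from_neg_natCast _ _ hmpos, PySem.List.slice_to_natCast]
  rw [PySem.List.slice?_none_none_neg_one]
  have hlen3 : (s.take k).length = k := by simp [List.length_take]; omega
  rw [hlen3]
  unfold reflB
  simp only [hk1, hk2, decide_true, Bool.true_and]
  rfl

-- candidate membership (nonnegative x)
theorem mem_find_candidates {s : List Char} {x : Int} (hx : 0 ≤ x) :
    x ∈ find_candidates s ↔ reflB s x.toNat = true := by
  rw [find_candidates_eq, List.mem_filter, PySem.List.mem_pyRange_one]
  constructor
  · exact fun h => h.2
  · intro h
    obtain ⟨hb1, hb2⟩ := reflB_bounds h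
    exact ⟨⟨by omega, by omega⟩, h⟩

theorem nodup_find_candidates (s : List Char) : (find_candidates s).Nodup := by
  rw [find_candidates_eq]
  exact (PySem.List.nodup_pyRange_one 1 (s.length : Int)).filter _

-- the two-pointer loop checked pointwise
theorem mirrorLoop_iff (s : List Char) (l1 r : Nat) :
    mirrorLoop s l1 r = true
      ↔ ∀ j < min l1 (s.length - r), s[l1 - 1 - j]? = s[r + j]? := by
  induction l1 generalizing r with
  | zero => simp [mirrorLoop]
  | succ l ih =>
    rw [mirrorLoop]
    by_cases hr : r < s.length
    · rw [if_pos hr]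
      by_cases he : s[l]? = s[r]?
      · rw [if_pos (beq_iff_eq.mpr he), ih]
        constructor
        · intro h j hj
          rcases Nat.eq_zero_or_pos j with h0 | hpos
          · subst h0
            have e1 : l + 1 - 1 - 0 = l := by omega
            have e2 : r + 0 = r := by omega
            rw [e1, e2]; exact he
          · have hj' : j - 1 < min l (s.length - (r + 1)) := by omega
            have := h (j - 1) hj'
            have e1 : l + 1 - 1 - j = l - 1 - (j - 1) := by omega
            have e2 : r + j = r + 1 + (j - 1) := by omega
            rw [e1, e2]; exact this
        · intro h j hj
          have hj' : j + 1 < min (l + 1) (s.length - r) := by omega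
          have := h (j + 1) hj'
          have e1 : l - 1 - j = l + 1 - 1 - (j + 1) := by omega
          have e2 : r + 1 + j = r + (j + 1) := by omega
          rw [e1, e2]; exact this
      · rw [if_neg (by simpa using he)]
        simp only [Bool.false_eq_true, false_iff]
        intro h
        have h0 : 0 < min (l + 1) (s.length - r) := by omega
        have := h 0 h0
        have e1 : l + 1 - 1 - 0 = l := by omega
        have e2 : r + 0 = r := by omega
        rw [e1, e2] at this
        exact he this
    · rw [if_neg hr]
      have hmin0 : min (l + 1) (s.length - r) = 0 := by omega
      simp [hmin0]

-- the slice form of the reflection test, checked pointwise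
theorem reflB_iff (s : List Char) (k : Nat) (h1 : 1 ≤ k) (h2 : k < s.length) :
    reflB s k = true
      ↔ ∀ j < min k (s.length - k), s[k - 1 - j]? = s[k + j]? := by
  unfold reflB
  simp only [h1, h2, decide_true, Bool.true_and, beq_iff_eq]
  set m := min k (s.length - k) with hm
  have hmk : m ≤ k := by omega
  have hml : m ≤ s.length - k := by omega
  have hlenR : ((s.drop k).take m).length = m := by
    simp [List.length_take, List.length_drop]; omega
  constructor
  · intro h j hj
    have hcg := congrArg (fun l => l[m - 1 - j]?) h
    simp only [List.getElem?_drop, List.getElem?_take] at hcg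
    rw [List.getElem?_reverse (by omega : m - 1 - j < ((s.drop k).take m).length)] at hcg
    rw [hlenR] at hcg
    simp only [List.getElem?_take, List.getElem?_drop] at hcg
    rw [if_pos (by omega), if_pos (by omega)] at hcg
    have e1 : k - m + (m - 1 - j) = k - 1 - j := by omega
    have e2 : k + (m - 1 - (m - 1 - j)) = k + j := by omega
    rw [e1, e2] at hcg
    exact hcg
  · intro h
    apply List.ext_getElem?
    intro t
    by_cases ht : t < m
    · rw [List.getElem?_drop, List.getElem?_take, if_pos (by omega)]
      rw [List.getElem?_reverse (by omega : t < ((s.drop k).take m).length), hlenR]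
      rw [List.getElem?_take, if_pos (by omega), List.getElem?_drop]
      have hpt := h (m - 1 - t) (by omega)
      have e1 : k - 1 - (m - 1 - t) = k - m + t := by omega
      rw [e1] at hpt
      exact hpt
    · rw [List.getElem?_drop, List.getElem?_take, if_neg (by omega)]
      rw [(List.getElem?_eq_none (by simp [hlenR]; omega) :
            (((s.drop k).take m).reverse)[t]? = none)]

-- port B's per-line test is reflB (nonnegative axis)
theorem is_mirror_eq_reflB (s : List Char) (x : Int) (hx : 0 ≤ x) :
    is_mirror s x = reflB s x.toNat := by
  unfold is_mirror
  by_cases hlt : x < 1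
  · have hx0 : x = 0 := by omega
    subst hx0
    simp [reflB]
  · by_cases hge : (s.length : Int) ≤ x
    · rw [if_pos (by simp [hlt, hge])]
      have hnl : ¬ (x.toNat < s.length) := by omega
      unfold reflB
      simp [hnl]
    · rw [if_neg (by simp [hlt, hge])]
      have hk1 : 1 ≤ x.toNat := by omega
      have hk2 : x.toNat < s.length := by omega
      rw [Bool.eq_iff_iff, mirrorLoop_iff, reflB_iff s x.toNat hk1 hk2]

-- counting a candidate over all lines
theorem count_flatMap_eq_countP (chunk : List String) (x : Int) (hx : 0 ≤ x) :
    (chunk.flatMap (fun line => find_candidates line.toList)).count x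
      = chunk.countP (fun line => reflB line.toList x.toNat) := by
  induction chunk with
  | nil => simp
  | cons c rest ih =>
    rw [List.flatMap_cons, List.count_append, List.countP_cons, ih]
    rw [(nodup_find_candidates c.toList).count (a := x)]
    by_cases hm : x ∈ find_candidates c.toList
    · rw [if_pos hm]
      have hr : reflB c.toList x.toNat = true := (mem_find_candidates hx).mp hm
      simp [hr]; omega
    · rw [if_neg hm]
      have hr : reflB c.toList x.toNat = false := by
        rw [Bool.eq_false_iff]
        intro h
        exact hm ((mem_find_candidates hx).mpr h)
      simp [hr]

-- the tally dict of port A, fully characterised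
theorem tallied_items (chunk : List String) (W : Nat)
    (hkey : ∀ line ∈ chunk, ∀ x ∈ find_candidates line.toList, x ≤ (W : Int)) :
    (chunk.foldl (fun d line =>
        (find_candidates line.toList).foldl (fun d c => d.modify c 0 (· + 1)) d)
      ((PySem.List.pyRange 0 ((W : Int) + 1) 1).foldl
        (fun d x => d.insert x 0) PySem.Dict.empty)).items
    = (PySem.List.pyRange 0 ((W : Int) + 1) 1).map
        (fun x => (x, ((chunk.flatMap (fun line => find_candidates line.toList)).count x : Int))) := by
  rw [← List.foldl_flatMap]
  set R := PySem.List.pyRange 0 ((W : Int) + 1) 1 with hR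
  set L := chunk.flatMap (fun line => find_candidates line.toList) with hL
  have hRnodup : R.Nodup := PySem.List.nodup_pyRange_one 0 ((W : Int) + 1)
  have hLmem : ∀ x ∈ L, x ∈ R := by
    intro x hxL
    rw [hL, List.mem_flatMap] at hxL
    obtain ⟨line, hline, hxc⟩ := hxL
    have h1 : x ∈ PySem.List.pyRange 1 (line.toList.length : Int) 1 := by
      rw [find_candidates_eq, List.mem_filter] at hxc
      exact hxc.1
    rw [PySem.List.mem_pyRange_one] at h1
    have h2 := hkey line hline x hxc
    rw [hR, PySem.List.mem_pyRange_one]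
    omega
  have hitems0 : (R.foldl (fun d x => d.insert x 0)
      (PySem.Dict.empty (κ := Int) (ν := Int))).items = R.map (fun x => (x, (0 : Int))) := by
    have hfresh : ∀ a ∈ R, (PySem.Dict.empty (κ := Int) (ν := Int)).contains ((fun a => a) a) = false :=
      fun a _ => PySem.Dict.contains_empty a
    have hnd : (R.map (fun a => a)).Nodup := by simpa using hRnodup
    have h := PySem.Dict.items_foldl_insert_fresh R (fun a => a) (fun _ => (0 : Int))
      PySem.Dict.empty hfresh hnd
    simpa using h
  set d0 := R.foldl (fun d x => d.insert x 0) (PySem.Dict.empty (κ := Int) (ν := Int)) with hd0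
  have hkeys0 : d0.keys = R := by
    unfold PySem.Dict.keys
    rw [hitems0, List.map_map]
    simp [Function.comp_def]
  have hgetD0 : ∀ x : Int, d0.getD x 0 = 0 := by
    intro x
    by_cases hxm : x ∈ R
    · exact PySem.Dict.getD_of_mem_items d0
        (by rw [hitems0]; exact List.mem_map_of_mem hxm) (by rw [hkeys0]; exact hRnodup) 0
    · refine PySem.Dict.getD_of_not_contains d0 0 ?_
      rw [PySem.Dict.contains_eq_decide_mem_keys, hkeys0]
      simpa using hxm
  have hkeys : (L.foldl (fun d c => d.modify c 0 (· + 1)) d0).keys = R := by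
    have h := PySem.Dict.keys_foldl_modify L 0 (fun _ _ => (fun v => v + 1)) d0
    rw [h, hkeys0]
    rw [PySem.Set.update_eq_append_filter]
    have hnil : (PySem.Set.ofList L).filter (fun y => !(PySem.Set.contains R y)) = [] := by
      rw [List.filter_eq_nil_iff]
      intro y hy
      have hyR : y ∈ R := hLmem y ((PySem.Set.mem_ofList L y).mp hy)
      simp
      exact hyR
    rw [hnil, List.append_nil]
  have hgetD : ∀ x : Int, (L.foldl (fun d c => d.modify c 0 (· + 1)) d0).getD x 0 = (L.count x : Int) := by
    intro x
    rw [PySem.Dict.getD_foldl_modify_add_one, hgetD0, zero_add]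
  rw [PySem.Dict.items_eq_map_keys _ (by rw [hkeys]; exact hRnodup) 0, hkeys]
  apply List.map_congr_left
  intro x _
  rw [hgetD]

-- ===== VERDICT (by name: the statement is the Claim_ definition above) =====
theorem find_vertical_axis_v2_spec : Claim_equal_find_vertical_axis_v2 := by
  unfold Claim_equal_find_vertical_axis_v2
  intro chunk _hdom hpre
  unfold Spec_find_vertical_axis_v2
  obtain ⟨hne, hkey, _hassert⟩ := hpre
  obtain ⟨c, rest, rfl⟩ : ∃ c rest, chunk = c :: rest := by
    cases chunk with
    | nil => exact absurd rfl hne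
    | cons c rest => exact ⟨c, rest, rfl⟩
  have hfirst : (PySem.List.pyGet? (c :: rest) 0).getD "" = c := by
    simp [PySem.List.pyGet?, PySem.List.pyIdx?]
  set W := c.toList.length with hW
  have hkey' : ∀ line ∈ c :: rest, ∀ x ∈ find_candidates line.toList, x ≤ (W : Int) := by
    intro line hline x hx
    have hx1 : 1 ≤ x := by
      rw [find_candidates_eq, List.mem_filter, PySem.List.mem_pyRange_one] at hx
      exact hx.1.1
    have hrefl : reflB line.toList x.toNat = true := (mem_find_candidates (by omega)).mp hx
    have hb := reflB_bounds hrefl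
    have := hkey line hline x.toNat hb.2 hrefl
    simp only [List.headD_cons] at this
    omega
  unfold find_vertical_axis_v2 find_vertical_axis_v2_alt
  simp only [hfirst]
  rw [tallied_items (c :: rest) W hkey']
  rw [List.filter_map, List.map_map]
  set n1 : Int := ((c :: rest).length : Int) - 1 with hn1
  have hfeq : ∀ x ∈ PySem.List.pyRange 0 ((W : Int) + 1) 1,
      ((fun p => p.2 == n1) ∘ fun x =>
          (x, (((c :: rest).flatMap (fun line => find_candidates line.toList)).count x : Int))) x
        = (fun axis => (((c :: rest).countP fun line => is_mirror line.toList axis) : Int) == n1) x := by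
    intro x hx
    have hx0 : 0 ≤ x := by
      rw [PySem.List.mem_pyRange_one] at hx; exact hx.1
    simp only [Function.comp_def]
    have hcc : List.countP (fun line => reflB line.toList x.toNat) (c :: rest)
        = List.countP (fun line => is_mirror line.toList x) (c :: rest) :=
      List.countP_congr (fun line _ => by rw [is_mirror_eq_reflB line.toList x hx0])
    rw [count_flatMap_eq_countP _ x hx0, hcc]
  rw [List.filter_congr hfeq]
  rw [← List.head?_filter]
  have hmapfst : ((List.filter
        (fun axis => (((c :: rest).countP fun line => is_mirror line.toList axis) : Int) == n1)
        (PySem.List.pyRange 0 ((W : Int) + 1) 1)).map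
        ((fun p => p.1) ∘ fun x =>
          (x, (((c :: rest).flatMap (fun line => find_candidates line.toList)).count x : Int)))) =
      List.filter (fun axis => (((c :: rest).countP fun line => is_mirror line.toList axis) : Int) == n1)
        (PySem.List.pyRange 0 ((W : Int) + 1) 1) := by
    simp [Function.comp_def]
  rw [hmapfst]
  cases List.filter (fun axis => (((c :: rest).countP fun line => is_mirror line.toList axis) : Int) == n1)
      (PySem.List.pyRange 0 ((W : Int) + 1) 1) with
  | nil => simp
  | cons a tl => simp
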